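-- pv_equiv track=rewrite | github.com/Jet-son/refactored-memory | Day6/Day6pt2.py | uniqueanswers
-- ===== SOURCE A (Python) =====
-- def uniqueanswers(glist):
--     uniquelist = []
--     valstring = 'abcdefghijklmnopqrstuvwxyz'
--     vallist = ['a','b','c','d','e','f','g',
--             'h','i','j','k','l','m','n','o',
--             'p','q','r','s','t','u','v','w',
--             'x','y','z']
--     for group in glist:
--         for person in group:
--             for i in valstring:
--                 if  i not in person and i in vallist:
--                     vallist.remove(i)
--                 else: continue
--         uniquelist.append(vallist)
--         vallist = ['a','b','c','d','e','f','g',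
--                 'h','i','j','k','l','m','n','o',
--                 'p','q','r','s','t','u','v','w',
--                 'x','y','z']
--
--     return uniquelist
-- ===== SOURCE B (Python) =====
-- def uniqueanswers(glist):
--     alphabet = 'abcdefghijklmnopqrstuvwxyz'
--     out = []
--     for group in glist:
--         common = set(alphabet)
--         for person in group:
--             common &= set(person)
--         out.append([c for c in alphabet if c in common])
--     return out
-- ===== Notes on version B (the rewrite author's own statement) =====
-- stated objective: simpler
-- what changed: Replaces A's per-person inner loop over all 26 letters with substring tests and list.remove by one set intersection per person (common &= set(person)), reading the surviving letters off the alphabet once per group.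
import Mathlib
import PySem

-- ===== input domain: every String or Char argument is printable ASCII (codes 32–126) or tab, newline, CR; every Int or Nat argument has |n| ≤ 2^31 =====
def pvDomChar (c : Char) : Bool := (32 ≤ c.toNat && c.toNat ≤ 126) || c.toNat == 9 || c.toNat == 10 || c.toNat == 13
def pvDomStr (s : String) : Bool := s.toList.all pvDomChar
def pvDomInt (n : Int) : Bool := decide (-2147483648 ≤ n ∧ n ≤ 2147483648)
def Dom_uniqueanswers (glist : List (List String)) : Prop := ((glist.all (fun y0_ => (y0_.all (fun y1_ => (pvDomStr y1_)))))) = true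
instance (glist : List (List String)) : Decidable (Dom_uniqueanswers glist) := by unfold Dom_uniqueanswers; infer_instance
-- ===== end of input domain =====

-- B replaces A's per-person 26-iteration removal loop by one set intersection per person
-- and reads the surviving letters off the alphabet once per group; objective: simpler.

-- ===== PORT A =====
-- valstring = 'abcdefghijklmnopqrstuvwxyz' as the character sequence the inner loop iterates
def pvValstring : List Char := "abcdefghijklmnopqrstuvwxyz".toList
-- the literal vallist A starts from and re-creates after every group
def pvVallist : List String :=
  ["a","b","c","d","e","f","g","h","i","j","k","l","m","n","o",
   "p","q","r","s","t","u","v","w","x","y","z"]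
-- body of A's innermost loop: 'if i not in person and i in vallist: vallist.remove(i)'
-- ('i not in person' is Python's substring test on the 1-char string i = PySem.Str.isIn)
def pvRemoveStep (person : String) (vallist : List String) (c : Char) : List String :=
  let i := String.ofList [c]
  if (!PySem.Str.isIn i person && vallist.contains i) then
    match PySem.List.remove? vallist i with
    | some v => v
    | none => vallist
  else vallist
-- A's 'for i in valstring' loop for one person
def pvPersonLoop (person : String) (vallist : List String) : List String :=
  pvValstring.foldl (pvRemoveStep person) vallist

def uniqueanswers (glist : List (List String)) : List (List String) :=
  (glist.foldl
    (fun (st : List (List String) × List String) group =>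
      let vallist := group.foldl (fun v person => pvPersonLoop person v) st.2
      (st.1 ++ [vallist], pvVallist))
    (([] : List (List String)), pvVallist)).1

-- ===== PORT B =====
-- set(person): the distinct 1-char strings of person
def pvCharSet (person : String) : PySem.Set String :=
  PySem.Set.ofList (person.toList.map (fun c => String.ofList [c]))
-- 'common &= set(person)' folded over the group, starting from common = set(alphabet)
def pvCommon (group : List String) : PySem.Set String :=
  group.foldl (fun common person => PySem.Set.inter common (pvCharSet person))
    (PySem.Set.ofList (pvValstring.map (fun c => String.ofList [c])))
-- '[c for c in alphabet if c in common]'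
def pvGroupOut (group : List String) : List String :=
  (pvValstring.filter (fun c => PySem.Set.contains (pvCommon group) (String.ofList [c]))).map
    (fun c => String.ofList [c])

def uniqueanswers_alt (glist : List (List String)) : List (List String) :=
  glist.foldl (fun out group => out ++ [pvGroupOut group]) []

-- ===== PRECONDITION & SPEC =====
def Spec_uniqueanswers (glist : List (List String)) (out : List (List String)) : Prop := out = uniqueanswers_alt glist
instance (glist : List (List String)) (out : List (List String)) : Decidable (Spec_uniqueanswers glist out) := by unfold Spec_uniqueanswers; infer_instance

-- ===== CLAIM (what is proved, stated in full; the proofs are below) =====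
def Claim_equal_uniqueanswers : Prop := ∀ (glist : List (List String)), Dom_uniqueanswers glist → Spec_uniqueanswers glist (uniqueanswers glist)

-- ===== LEMMAS AND PROOFS =====

-- 'i in person' for the 1-char string i = [c] is membership of the char c
theorem pv_isIn_single (c : Char) (p : String) :
    PySem.Str.isIn (String.ofList [c]) p = p.toList.contains c := by
  have h := PySem.Str.isIn_iff_infix (String.ofList [c]) p
  rw [Bool.eq_iff_iff, h]
  simp [List.singleton_infix_iff]

-- one person's inner loop over any char list cs, on a duplicate-free vallist:
-- it keeps exactly the entries that occur in person or are not named by cs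
theorem pv_foldl_removeStep (p : String) (cs : List Char) (v : List String) (hnd : v.Nodup) :
    cs.foldl (pvRemoveStep p) v
      = v.filter (fun s => PySem.Str.isIn s p || !((cs.map (fun c => String.ofList [c])).contains s)) := by
  induction cs generalizing v with
  | nil => simp
  | cons c cs ih =>
    simp only [List.foldl_cons]
    by_cases hcond : (!PySem.Str.isIn (String.ofList [c]) p && v.contains (String.ofList [c])) = true
    · obtain ⟨hni, hmem⟩ := Bool.and_eq_true_iff.mp hcond
      rw [Bool.not_eq_true'] at hni
      have hmem' : String.ofList [c] ∈ v := by simpa using hmem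
      have hstep : pvRemoveStep p v c = v.filter (fun s => s != String.ofList [c]) := by
        simp only [pvRemoveStep]
        rw [if_pos hcond, PySem.List.remove?_eq_some_erase v _ hmem']
        exact List.Nodup.erase_eq_filter hnd _
      rw [hstep, ih _ (hnd.filter _), List.filter_filter]
      refine List.filter_congr (fun s hs => ?_)
      rw [Bool.eq_iff_iff]
      by_cases hsc : s = String.ofList [c]
      · subst hsc
        have hni' : PySem.Chars.isIn [c] p.toList = false := by simpa using hni
        simp [hni']
      · simp [hsc]
    · have hstep : pvRemoveStep p v c = v := by
        simp only [pvRemoveStep]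
        rw [if_neg hcond]
      rw [hstep, ih _ hnd]
      refine List.filter_congr (fun s hs => ?_)
      rw [Bool.eq_iff_iff]
      by_cases hsc : s = String.ofList [c]
      · subst hsc
        rcases Bool.and_eq_false_iff.mp (Bool.not_eq_true _ ▸ hcond) with h1 | h2
        · rw [Bool.not_eq_false'] at h1
          have h1' : PySem.Chars.isIn [c] p.toList = true := by simpa using h1
          simp [h1']
        · exact absurd (by simpa using hs) (by simpa using h2)
      · simp [hsc]

theorem pv_nodup_alpha : (pvValstring.map (fun c => String.ofList [c])).Nodup := by decide

-- one person's full pass, on any filtered sublist of the alphabet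
theorem pv_personLoop_filter (p : String) (q : String → Bool) :
    pvPersonLoop p ((pvValstring.map (fun c => String.ofList [c])).filter q)
      = (pvValstring.map (fun c => String.ofList [c])).filter (fun s => q s && PySem.Str.isIn s p) := by
  rw [pvPersonLoop, pv_foldl_removeStep p pvValstring _ (pv_nodup_alpha.filter q), List.filter_filter]
  refine List.filter_congr (fun s hs => ?_)
  have hc : (pvValstring.map (fun c => String.ofList [c])).contains s = true :=
    List.elem_eq_true_of_mem hs
  rw [hc]
  simp [Bool.and_comm]

-- A's per-group loop over the persons
theorem pv_groupA (ps : List String) (q : String → Bool) :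
    ps.foldl (fun v person => pvPersonLoop person v)
        ((pvValstring.map (fun c => String.ofList [c])).filter q)
      = (pvValstring.map (fun c => String.ofList [c])).filter
          (fun s => q s && ps.all (fun p => PySem.Str.isIn s p)) := by
  induction ps generalizing q with
  | nil => simp
  | cons p ps ih =>
    simp only [List.foldl_cons]
    rw [pv_personLoop_filter, ih]
    refine List.filter_congr (fun s _ => ?_)
    rw [Bool.eq_iff_iff]
    simp [Bool.and_assoc]

-- B's per-group intersection loop
theorem pv_groupB (ps : List String) (q : String → Bool) :
    ps.foldl (fun common person => PySem.Set.inter common (pvCharSet person))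
        ((pvValstring.map (fun c => String.ofList [c])).filter q)
      = (pvValstring.map (fun c => String.ofList [c])).filter
          (fun s => q s && ps.all (fun p => (pvCharSet p).contains s)) := by
  induction ps generalizing q with
  | nil => simp
  | cons p ps ih =>
    simp only [List.foldl_cons]
    have hstep : PySem.Set.inter ((pvValstring.map (fun c => String.ofList [c])).filter q) (pvCharSet p)
        = (pvValstring.map (fun c => String.ofList [c])).filter (fun s => q s && (pvCharSet p).contains s) := by
      show List.filter _ _ = _
      rw [List.filter_filter]
      refine List.filter_congr (fun s _ => ?_)
      rw [Bool.eq_iff_iff]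
      simp [Bool.and_comm]
    rw [hstep, ih]
    refine List.filter_congr (fun s _ => ?_)
    rw [Bool.eq_iff_iff]
    simp [Bool.and_assoc]

-- the two per-person membership tests agree on 1-char strings
theorem pv_contains_charSet (c : Char) (p : String) :
    (pvCharSet p).contains (String.ofList [c]) = PySem.Str.isIn (String.ofList [c]) p := by
  rw [pv_isIn_single, Bool.eq_iff_iff]
  constructor
  · intro h
    have hmem := (PySem.Set.mem_ofList _ _).mp (by simpa using h)
    obtain ⟨d, hd, he⟩ := List.mem_map.mp hmem
    have hdc : d = c := by
      have := congrArg String.toList he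
      simpa using this
    subst hdc
    simpa using hd
  · intro h
    have : String.ofList [c] ∈ pvCharSet p := by
      rw [pvCharSet, PySem.Set.mem_ofList]
      exact List.mem_map_of_mem (by simpa using h)
    simpa using this

-- per group, A's final vallist equals B's output list
theorem pv_group_eq (g : List String) :
    g.foldl (fun v person => pvPersonLoop person v) pvVallist = pvGroupOut g := by
  have hinit : pvVallist = (pvValstring.map (fun c => String.ofList [c])).filter (fun _ => true) := by
    decide
  have hinitB : PySem.Set.ofList (pvValstring.map (fun c => String.ofList [c]))
      = (pvValstring.map (fun c => String.ofList [c])).filter (fun _ => true) := by decide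
  rw [hinit, pv_groupA, pvGroupOut, pvCommon, hinitB, pv_groupB, List.filter_map]
  refine congrArg (List.map _) (List.filter_congr (fun c hc => ?_))
  rw [Bool.eq_iff_iff]
  have hmem : String.ofList [c] ∈ pvValstring.map (fun d => String.ofList [d]) :=
    List.mem_map_of_mem hc
  simp only [Function.comp]
  constructor
  · intro h
    have hall : ∀ p ∈ g, (pvCharSet p).contains (String.ofList [c]) = true := by
      intro p hp
      rw [pv_contains_charSet]
      have := (List.all_eq_true.mp (by simpa using h)) p hp
      simpa using this
    have : String.ofList [c] ∈ (pvValstring.map (fun d => String.ofList [d])).filter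
        (fun s => (fun _ => true) s && g.all (fun p => (pvCharSet p).contains s)) :=
      List.mem_filter.mpr ⟨hmem, by simpa using List.all_eq_true.mpr hall⟩
    exact List.elem_eq_true_of_mem this
  · intro h
    have hmem2 : String.ofList [c] ∈ (pvValstring.map (fun d => String.ofList [d])).filter
        (fun s => (fun _ => true) s && g.all (fun p => (pvCharSet p).contains s)) :=
      List.mem_of_elem_eq_true h
    have h2 := (List.mem_filter.mp hmem2).2
    rw [Bool.true_and] at h2
    have hall := List.all_eq_true.mp h2
    rw [Bool.true_and]
    refine List.all_eq_true.mpr (fun p hp => ?_)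
    rw [← pv_contains_charSet]
    exact hall p hp

-- A's outer loop, with the accumulated uniquelist generalized
theorem pv_outerA (gs : List (List String)) (acc : List (List String)) :
    (gs.foldl
      (fun (st : List (List String) × List String) group =>
        let vallist := group.foldl (fun v person => pvPersonLoop person v) st.2
        (st.1 ++ [vallist], pvVallist))
      (acc, pvVallist)).1 = acc ++ gs.map pvGroupOut := by
  induction gs generalizing acc with
  | nil => simp
  | cons g gs ih => simp [ih, pv_group_eq g]

-- ===== VERDICT (by name: the statement is the Claim_ definition above) =====
theorem uniqueanswers_spec : Claim_equal_uniqueanswers := by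
  intro glist _
  show uniqueanswers glist = uniqueanswers_alt glist
  rw [uniqueanswers, uniqueanswers_alt, pv_outerA,
    PySem.List.foldl_append_singleton_eq_map]
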